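-- pv_equiv track=rewrite | github.com/edeliciouso/Exercises | game with cells.py | game_with_cells
-- ===== SOURCE A (Python) =====
-- def game_with_cells(m, n):
--     x = 1
--     y = 1
--     for i in range(1, m + 1, 2):
--         if i > 2:
--             x += 1
--     for i in range(1, n + 1, 2):
--         if i > 2:
--             y += 1
--     return x * y
-- ===== SOURCE B (Python) =====
-- def game_with_cells(m, n):
--     # Closed form: odd i in [1, m] with i > 2 number max(0, (m+1)//2 - 1),
--     # so each factor is max(1, (m+1)//2).
--     return max(1, (m + 1) // 2) * max(1, (n + 1) // 2)
-- ===== Notes on version B (the rewrite author's own statement) =====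
-- stated objective: faster
-- what changed: Replaces the two counting loops over range(1, m+1, 2) / range(1, n+1, 2) with the closed form max(1, (m+1)//2) for each factor.
import Mathlib
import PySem

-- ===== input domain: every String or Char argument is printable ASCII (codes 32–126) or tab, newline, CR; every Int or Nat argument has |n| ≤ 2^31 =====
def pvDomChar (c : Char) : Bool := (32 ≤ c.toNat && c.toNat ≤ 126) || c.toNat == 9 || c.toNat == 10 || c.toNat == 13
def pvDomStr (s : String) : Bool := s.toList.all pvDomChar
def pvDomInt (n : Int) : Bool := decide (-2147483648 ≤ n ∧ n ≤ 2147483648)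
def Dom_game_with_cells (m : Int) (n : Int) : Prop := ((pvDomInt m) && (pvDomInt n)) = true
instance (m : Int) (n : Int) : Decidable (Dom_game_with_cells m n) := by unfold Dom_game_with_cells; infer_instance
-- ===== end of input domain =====

-- B replaces A's two counting loops with the closed form max(1,(m+1)//2) per factor (O(1) vs O(m+n)).


-- ===== PORT A =====
def game_with_cells (m : Int) (n : Int) : Int :=
  let x : Int := 1
  let y : Int := 1
  let x := (PySem.List.pyRange 1 (m + 1) 2).foldl (fun x i => if i > 2 then x + 1 else x) x
  let y := (PySem.List.pyRange 1 (n + 1) 2).foldl (fun y i => if i > 2 then y + 1 else y) y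
  x * y

-- ===== PORT B =====
def game_with_cells_alt (m : Int) (n : Int) : Int :=
  max 1 (PySem.Int.floordiv (m + 1) 2) * max 1 (PySem.Int.floordiv (n + 1) 2)

-- ===== PRECONDITION & SPEC =====
def Spec_game_with_cells (m : Int) (n : Int) (out : Int) : Prop := out = game_with_cells_alt m n
instance (m : Int) (n : Int) (out : Int) : Decidable (Spec_game_with_cells m n out) := by unfold Spec_game_with_cells; infer_instance

-- ===== CLAIM (what is proved, stated in full; the proofs are below) =====
def Claim_equal_game_with_cells : Prop := ∀ (m : Int) (n : Int), Dom_game_with_cells m n → Spec_game_with_cells m n (game_with_cells m n)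

-- ===== LEMMAS AND PROOFS =====

-- counting loop over the mapped range equals max 1 N
theorem pv_count_loop (N : Nat) :
    (List.range N).foldl (fun (x : Int) (k : Nat) => if (1 : Int) + 2 * (k : Int) > 2 then x + 1 else x) 1
      = max 1 (N : Int) := by
  induction N with
  | zero => simp
  | succ N ih =>
    rw [List.range_succ]
    simp only [List.foldl_append, ih, List.foldl_cons, List.foldl_nil]
    by_cases h : (1 : Int) + 2 * (N : Int) > 2 <;> simp only [h, if_true, if_false] <;>
      push_cast <;> omega

-- one factor of A equals one factor of B
theorem pv_factor (m : Int) :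
    (PySem.List.pyRange 1 (m + 1) 2).foldl (fun x i => if i > 2 then x + 1 else x) 1
      = max 1 (PySem.Int.floordiv (m + 1) 2) := by
  rw [PySem.List.pyRange_of_pos 1 (m + 1) (by norm_num), List.foldl_map, pv_count_loop]
  have hfd : PySem.Int.floordiv (m + 1) 2 = (m + 1) / 2 := by
    simp [PySem.Int.floordiv, Int.fdiv_eq_ediv]
  rw [hfd]
  split_ifs with h <;> rw [Int.max_def, Int.max_def] <;> split_ifs <;> omega

-- ===== VERDICT (by name: the statement is the Claim_ definition above) =====
theorem game_with_cells_spec : Claim_equal_game_with_cells := by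
  intro m n _
  unfold Spec_game_with_cells game_with_cells game_with_cells_alt
  simp only
  rw [pv_factor, pv_factor]
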